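-- pv_equiv track=rewrite | github.com/Cryptic12/Sudoku-Sovler | Controller/Reducers/Reducers.py | reduce_reductions
-- ===== SOURCE A (Python) =====
-- def reduce_reductions(reductions):
--     reduced_reductions = dict()
--
--     for reduction in reductions:
--         position, possibilities = reduction
--
--         if len(possibilities) == 0:
--             continue
--
--         if position in reduced_reductions:
--             reduced_reductions[position] = reduced_reductions[position].intersection(
--                 possibilities)
--         else:
--             reduced_reductions[position] = possibilities
--
--     to_return = []
--
--     for position in reduced_reductions:
--         to_return.append((position, reduced_reductions[position]))
--
--     return to_return
-- ===== SOURCE B (Python) =====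
-- def reduce_reductions(reductions):
--     groups = {}
--     for position, possibilities in reductions:
--         if possibilities:
--             groups[position] = groups.get(position, []) + [possibilities]
--     return [(position, set.intersection(*sets)) for position, sets in groups.items()]
-- ===== Notes on version B (the rewrite author's own statement) =====
-- stated objective: idiomatic
-- what changed: Replaces the incremental intersect-during-scan with a group-then-reduce shape: a first pass groups the non-empty possibility sets per position, a comprehension then intersects each group in one set.intersection(*sets) call.
import Mathlib
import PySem

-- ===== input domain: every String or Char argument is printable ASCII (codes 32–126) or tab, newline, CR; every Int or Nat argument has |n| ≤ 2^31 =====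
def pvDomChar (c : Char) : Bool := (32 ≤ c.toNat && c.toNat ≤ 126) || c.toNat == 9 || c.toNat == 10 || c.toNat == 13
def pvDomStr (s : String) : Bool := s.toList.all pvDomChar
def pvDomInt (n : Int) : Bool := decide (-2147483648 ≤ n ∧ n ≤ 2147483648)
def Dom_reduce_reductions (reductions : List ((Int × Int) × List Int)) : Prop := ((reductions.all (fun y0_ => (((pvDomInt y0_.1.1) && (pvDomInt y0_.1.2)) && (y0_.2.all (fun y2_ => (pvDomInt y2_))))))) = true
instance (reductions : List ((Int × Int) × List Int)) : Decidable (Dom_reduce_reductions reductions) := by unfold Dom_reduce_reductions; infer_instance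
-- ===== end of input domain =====

-- B replaces A's intersect-during-scan with a group-then-reduce decomposition (idiomatic, not faster).

-- ===== PORT A =====
def reduce_reductions (reductions : List ((Int × Int) × List Int)) : List ((Int × Int) × List Int) :=
  let reduced_reductions : PySem.Dict (Int × Int) (List Int) :=
    reductions.foldl (fun d reduction =>
      let position := reduction.1
      let possibilities := reduction.2
      if possibilities.length == 0 then d
      else if d.contains position then
        d.insert position (PySem.Set.inter (d.getD position []) possibilities)
      else
        d.insert position possibilities) PySem.Dict.empty
  reduced_reductions.items.foldl (fun to_return kv => to_return ++ [(kv.1, kv.2)]) []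

-- ===== PORT B =====
-- set.intersection(*sets) on a non-empty list of sets: fold intersection over the tail
def pvInterAll (ls : List (List Int)) : List Int :=
  match ls with
  | [] => []
  | s :: rest => rest.foldl PySem.Set.inter s

def reduce_reductions_alt (reductions : List ((Int × Int) × List Int)) : List ((Int × Int) × List Int) :=
  let groups : PySem.Dict (Int × Int) (List (List Int)) :=
    reductions.foldl (fun g r =>
      if r.2.isEmpty then g
      else g.insert r.1 (g.getD r.1 [] ++ [r.2])) PySem.Dict.empty
  groups.items.map (fun kv => (kv.1, pvInterAll kv.2))

-- ===== PRECONDITION & SPEC =====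
def Spec_reduce_reductions (reductions : List ((Int × Int) × List Int)) (out : List ((Int × Int) × List Int)) : Prop := out = reduce_reductions_alt reductions
instance (reductions : List ((Int × Int) × List Int)) (out : List ((Int × Int) × List Int)) : Decidable (Spec_reduce_reductions reductions out) := by unfold Spec_reduce_reductions; infer_instance

-- ===== CLAIM (what is proved, stated in full; the proofs are below) =====
def Claim_equal_reduce_reductions : Prop := ∀ (reductions : List ((Int × Int) × List Int)), Dom_reduce_reductions reductions → Spec_reduce_reductions reductions (reduce_reductions reductions)

-- ===== LEMMAS AND PROOFS =====

-- map B's group dict to A's intersected dict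
def pvFmap (g : PySem.Dict (Int × Int) (List (List Int))) : PySem.Dict (Int × Int) (List Int) :=
  PySem.Dict.mk (g.items.map (fun kv => (kv.1, pvInterAll kv.2)))

lemma pvFmap_items (g : PySem.Dict (Int × Int) (List (List Int))) :
    (pvFmap g).items = g.items.map (fun kv => (kv.1, pvInterAll kv.2)) := rfl

lemma pvFmap_get? (g : PySem.Dict (Int × Int) (List (List Int))) (k : Int × Int) :
    (pvFmap g).get? k = (g.get? k).map pvInterAll := by
  obtain ⟨items⟩ := g
  induction items with
  | nil => rfl
  | cons p rest ih =>
    simp only [pvFmap, List.map_cons] at *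
    rw [PySem.Dict.get?_mk_cons, PySem.Dict.get?_mk_cons]
    by_cases h : p.1 == k <;> simp [h, ih]

lemma pvFmap_contains (g : PySem.Dict (Int × Int) (List (List Int))) (k : Int × Int) :
    (pvFmap g).contains k = g.contains k := by
  rw [PySem.Dict.contains_eq_isSome_get?, PySem.Dict.contains_eq_isSome_get?, pvFmap_get?]
  cases g.get? k <;> rfl

lemma pvFmap_insert (g : PySem.Dict (Int × Int) (List (List Int))) (k : Int × Int) (v : List (List Int)) :
    pvFmap (g.insert k v) = (pvFmap g).insert k (pvInterAll v) := by
  apply PySem.Dict.ext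
  rw [pvFmap_items, PySem.Dict.items_insert, PySem.Dict.items_insert, pvFmap_items, pvFmap_contains]
  by_cases h : g.contains k = true
  · simp only [h, if_true, List.map_map]
    apply List.map_congr_left
    intro p _
    by_cases hp : p.1 = k <;> simp [hp]
  · simp only [h, Bool.false_eq_true, if_false, List.map_append, List.map_cons, List.map_nil]

lemma pvInterAll_append (ls : List (List Int)) (v : List Int) (h : ls ≠ []) :
    pvInterAll (ls ++ [v]) = PySem.Set.inter (pvInterAll ls) v := by
  obtain ⟨s, rest, rfl⟩ := List.exists_cons_of_ne_nil h
  simp [pvInterAll, List.foldl_append]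

-- the two fold loops stay related by pvFmap, given that B's group values are non-empty
lemma pvLoop (l : List ((Int × Int) × List Int))
    (g : PySem.Dict (Int × Int) (List (List Int)))
    (hg : ∀ kv ∈ g.items, kv.2 ≠ ([] : List (List Int))) :
    l.foldl (fun d reduction =>
      if reduction.2.length == 0 then d
      else if d.contains reduction.1 then
        d.insert reduction.1 (PySem.Set.inter (d.getD reduction.1 []) reduction.2)
      else
        d.insert reduction.1 reduction.2) (pvFmap g)
    = pvFmap (l.foldl (fun g r =>
        if r.2.isEmpty then g
        else g.insert r.1 (g.getD r.1 [] ++ [r.2])) g) := by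
  induction l generalizing g with
  | nil => rfl
  | cons r t ih =>
    simp only [List.foldl_cons]
    by_cases he : r.2.isEmpty = true
    · have h1 : (r.2.length == 0) = true := by
        simp only [List.isEmpty_iff] at he
        simp [he]
      rw [if_pos he, if_pos h1]
      exact ih g hg
    · have hne2 : r.2 ≠ [] := by simpa [List.isEmpty_iff] using he
      have h1 : ¬ ((r.2.length == 0) = true) := by
        simp [List.length_eq_zero_iff, hne2]
      rw [if_neg he, if_neg h1]
      have hstep : (if (pvFmap g).contains r.1 then
            (pvFmap g).insert r.1 (PySem.Set.inter ((pvFmap g).getD r.1 []) r.2)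
          else (pvFmap g).insert r.1 r.2)
          = pvFmap (g.insert r.1 (g.getD r.1 [] ++ [r.2])) := by
        rw [pvFmap_insert, pvFmap_contains]
        by_cases hc : g.contains r.1 = true
        · obtain ⟨ls, hls⟩ : ∃ ls, g.get? r.1 = some ls := by
            rw [PySem.Dict.contains_eq_isSome_get?] at hc
            exact Option.isSome_iff_exists.mp hc
          have hmem : (r.1, ls) ∈ g.items := PySem.Dict.mem_items_of_get?_eq_some g hls
          have hnev : ls ≠ [] := hg _ hmem
          have hgd : g.getD r.1 [] = ls := PySem.Dict.getD_of_get?_eq_some g [] hls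
          have hfd : (pvFmap g).getD r.1 [] = pvInterAll ls := by
            rw [PySem.Dict.getD_eq_get?_getD, pvFmap_get?, hls]; rfl
          rw [if_pos hc, hgd, hfd, pvInterAll_append ls r.2 hnev]
        · have hcf : g.contains r.1 = false := by
            cases h : g.contains r.1
            · rfl
            · exact absurd h hc
          have hgd : g.getD r.1 [] = [] := PySem.Dict.getD_of_not_contains g [] hcf
          rw [if_neg hc, hgd]
          rfl
      rw [hstep]
      apply ih
      intro kv hkv
      rcases (PySem.Dict.mem_items_insert _ _ _ _).mp hkv with h1 | h2
      · subst h1; simp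
      · exact hg _ h2.1

-- ===== VERDICT (by name: the statement is the Claim_ definition above) =====
theorem reduce_reductions_spec : Claim_equal_reduce_reductions := by
  intro reductions _
  show reduce_reductions reductions = reduce_reductions_alt reductions
  simp only [reduce_reductions, reduce_reductions_alt]
  have hempty : (PySem.Dict.empty : PySem.Dict (Int × Int) (List Int)) = pvFmap PySem.Dict.empty := rfl
  rw [hempty, pvLoop reductions PySem.Dict.empty (by intro kv h; simp [PySem.Dict.empty] at h)]
  rw [PySem.List.foldl_append_singleton_eq_map, pvFmap_items]
  simp
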